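-- pv_equiv track=rewrite | github.com/abstractmachine/playable-blip-trainer | annotate.py | annotate_scenes
-- ===== SOURCE A (Python) =====
-- from typing import List, Dict, Optional
--
-- def get_unique_scenes(shotlist: List[Dict]) -> List[str]:
--     scenes = set()
--     for shot in shotlist:
--         s = (shot.get('Scene') or '').strip()
--         if s:
--             scenes.add(s)
--     return sorted(list(scenes), key=lambda x: int(x) if x.isdigit() else 0)
--
-- def annotate_scene(scene_id: str, shots: List[Dict]) -> str:
--     """Minimal scene summarizer placeholder."""
--     return f"Scene {scene_id} summary."
--
-- def annotate_scenes(shotlist: List[Dict]) -> List[Dict]: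
--     """Apply a simple per-scene summary across shots."""
--     scenes = get_unique_scenes(shotlist)
--     for sid in scenes:
--         scene_shots = [s for s in shotlist if (s.get('Scene') or '').strip() == sid]
--         summary = annotate_scene(sid, scene_shots)
--         for s in scene_shots:
--             s['Scene_Caption'] = summary
--     return shotlist
-- ===== SOURCE B (Python) =====
-- def annotate_scene(scene_id, shots):
--     """Minimal scene summarizer placeholder."""
--     return f"Scene {scene_id} summary."
--
-- def annotate_scenes(shotlist):
--     """Single linear pass: each shot's caption depends only on its own scene id."""
--     for shot in shotlist:
--         scene = (shot.get('Scene') or '').strip()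
--         if scene:
--             shot['Scene_Caption'] = annotate_scene(scene, [shot])
--     return shotlist
-- ===== Notes on version B (the rewrite author's own statement) =====
-- stated objective: simpler
-- what changed: Replaces the build-unique-scene-set, sort, and per-scene rescan of the whole shot list with one linear pass that assigns each shot its own scene's summary directly; no set, no sort, no nested scan.
import Mathlib
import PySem

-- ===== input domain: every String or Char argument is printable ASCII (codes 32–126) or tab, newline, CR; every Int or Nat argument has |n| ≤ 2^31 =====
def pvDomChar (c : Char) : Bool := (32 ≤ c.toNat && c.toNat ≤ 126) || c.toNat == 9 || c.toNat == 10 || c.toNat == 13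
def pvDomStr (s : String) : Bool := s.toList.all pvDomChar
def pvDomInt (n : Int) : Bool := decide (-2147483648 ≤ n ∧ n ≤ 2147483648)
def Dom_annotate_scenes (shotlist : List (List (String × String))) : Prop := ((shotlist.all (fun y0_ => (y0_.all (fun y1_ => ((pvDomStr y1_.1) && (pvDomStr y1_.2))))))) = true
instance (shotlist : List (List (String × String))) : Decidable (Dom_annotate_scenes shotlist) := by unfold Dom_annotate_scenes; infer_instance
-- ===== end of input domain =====

-- B replaces A's build-set / sort / per-scene rescan with one linear pass assigning each shot its
-- own scene's summary (simpler). Both A and B mutate the shot dicts in place in Python; the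
-- equivalence proved here is about the returned value (B performs the same mutation as A).

-- ===== PORT A =====
-- shot.get('Scene') or '' then .strip()  (dicts are modelled as PySem.Dict over the assoc list)
def sceneOf (shot : List (String × String)) : String :=
  PySem.Str.strip (((PySem.Dict.mk shot).get? "Scene").getD "")

-- s['Scene_Caption'] = summary  (in-place dict mutation modelled as the updated assoc list)
def updShot (shot : List (String × String)) (summary : String) : List (String × String) :=
  ((PySem.Dict.mk shot).insert "Scene_Caption" summary).items

def annotate_scene (scene_id : String) (_shots : List (List (String × String))) : String :=
  "Scene " ++ scene_id ++ " summary."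

def get_unique_scenes (shotlist : List (List (String × String))) : List String :=
  let scenes : PySem.Set String :=
    shotlist.foldl (fun acc shot =>
      if sceneOf shot ≠ "" then PySem.Set.add acc (sceneOf shot) else acc) PySem.Set.empty
  PySem.List.sorted scenes
    (fun x => if PySem.Str.strIsdigit x then (PySem.Int.ofStr? x).getD 0 else (0 : Int)) false

def annotate_scenes (shotlist : List (List (String × String))) : List (List (String × String)) :=
  let scenes := get_unique_scenes shotlist
  scenes.foldl (fun cur sid =>
    let scene_shots := cur.filter (fun s => sceneOf s == sid)
    let summary := annotate_scene sid scene_shots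
    cur.map (fun s => if sceneOf s = sid then updShot s summary else s)) shotlist

-- ===== PORT B =====
def annotate_scenes_alt (shotlist : List (List (String × String))) : List (List (String × String)) :=
  shotlist.map (fun shot =>
    let scene := sceneOf shot
    if scene ≠ "" then updShot shot (annotate_scene scene [shot]) else shot)

-- ===== PRECONDITION & SPEC =====
def Spec_annotate_scenes (shotlist : List (List (String × String))) (out : List (List (String × String))) : Prop := out = annotate_scenes_alt shotlist
instance (shotlist : List (List (String × String))) (out : List (List (String × String))) : Decidable (Spec_annotate_scenes shotlist out) := by unfold Spec_annotate_scenes; infer_instance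

-- ===== CLAIM (what is proved, stated in full; the proofs are below) =====
def Claim_equal_annotate_scenes : Prop := ∀ (shotlist : List (List (String × String))), Dom_annotate_scenes shotlist → Spec_annotate_scenes shotlist (annotate_scenes shotlist)

-- ===== LEMMAS AND PROOFS =====

-- A's per-scene update step, applied to one shot
def gStep (sid : String) (s : List (String × String)) : List (String × String) :=
  if sceneOf s = sid then updShot s ("Scene " ++ sid ++ " summary.") else s

theorem sceneOf_updShot (shot : List (String × String)) (summary : String) :
    sceneOf (updShot shot summary) = sceneOf shot := by
  have hne : ("Scene" : String) ≠ "Scene_Caption" := by decide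
  simp [sceneOf, updShot, PySem.Dict.get?_insert_of_ne _ _ hne]

theorem foldl_map_fusion {α β : Type} (f : β → α → α) (L : List β) (xs : List α) :
    L.foldl (fun cur b => cur.map (f b)) xs = xs.map (fun x => L.foldl (fun a b => f b a) x) := by
  induction L generalizing xs with
  | nil => simp
  | cons b t ih => simp [ih, List.map_map]

theorem fold_g_not_mem (x : List (String × String)) (L : List String) (h : sceneOf x ∉ L) :
    L.foldl (fun a sid => gStep sid a) x = x := by
  induction L with
  | nil => rfl
  | cons a t ih =>
    simp only [List.mem_cons, not_or] at h
    rw [List.foldl_cons]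
    rw [show gStep a x = x from if_neg h.1]
    exact ih h.2

theorem fold_g_eq (x : List (String × String)) (L : List String) (hnd : L.Nodup) :
    L.foldl (fun a sid => gStep sid a) x =
      if sceneOf x ∈ L then updShot x ("Scene " ++ sceneOf x ++ " summary.") else x := by
  induction L with
  | nil => simp
  | cons a t ih =>
    rcases List.nodup_cons.mp hnd with ⟨hna, hnd'⟩
    rw [List.foldl_cons]
    by_cases hx : sceneOf x = a
    · rw [show gStep a x = updShot x ("Scene " ++ a ++ " summary.") from if_pos hx]
      rw [fold_g_not_mem _ t (by rw [sceneOf_updShot, hx]; exact hna)]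
      rw [if_pos (List.mem_cons.mpr (Or.inl hx)), hx]
    · rw [show gStep a x = x from if_neg hx, ih hnd']
      simp [List.mem_cons, hx]

theorem mem_scenesSet (y : String) (sl : List (List (String × String))) (acc : PySem.Set String) :
    y ∈ sl.foldl (fun acc shot => if sceneOf shot ≠ "" then PySem.Set.add acc (sceneOf shot) else acc) acc
      ↔ y ∈ acc ∨ (∃ shot ∈ sl, sceneOf shot = y ∧ y ≠ "") := by
  induction sl generalizing acc with
  | nil => simp
  | cons a t ih =>
    rw [List.foldl_cons]
    by_cases h : sceneOf a = ""
    · rw [if_neg (by simp [h]), ih]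
      constructor
      · rintro (hy | ⟨s, hs, h1, h2⟩)
        · exact Or.inl hy
        · exact Or.inr ⟨s, List.mem_cons_of_mem _ hs, h1, h2⟩
      · rintro (hy | ⟨s, hs, h1, h2⟩)
        · exact Or.inl hy
        · rcases List.mem_cons.mp hs with rfl | hs'
          · exact absurd (h1 ▸ h) h2
          · exact Or.inr ⟨s, hs', h1, h2⟩
    · rw [if_pos h, ih]
      constructor
      · rintro (hy | ⟨s, hs, h1, h2⟩)
        · rcases (PySem.Set.mem_add _ _ _).mp hy with hy' | hy'
          · exact Or.inl hy'
          · exact Or.inr ⟨a, List.mem_cons_self .., hy'.symm, hy' ▸ h⟩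
        · exact Or.inr ⟨s, List.mem_cons_of_mem _ hs, h1, h2⟩
      · rintro (hy | ⟨s, hs, h1, h2⟩)
        · exact Or.inl ((PySem.Set.mem_add _ _ _).mpr (Or.inl hy))
        · rcases List.mem_cons.mp hs with rfl | hs'
          · exact Or.inl ((PySem.Set.mem_add _ _ _).mpr (Or.inr h1.symm))
          · exact Or.inr ⟨s, hs', h1, h2⟩

theorem nodup_scenesSet (sl : List (List (String × String))) (acc : PySem.Set String) (h : acc.Nodup) :
    (sl.foldl (fun acc shot => if sceneOf shot ≠ "" then PySem.Set.add acc (sceneOf shot) else acc) acc).Nodup := by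
  induction sl generalizing acc with
  | nil => exact h
  | cons a t ih =>
    rw [List.foldl_cons]
    split
    · exact ih _ (PySem.Set.nodup_add _ _ h)
    · exact ih _ h

theorem mem_unique_scenes (y : String) (sl : List (List (String × String))) :
    y ∈ get_unique_scenes sl ↔ ∃ shot ∈ sl, sceneOf shot = y ∧ y ≠ "" := by
  unfold get_unique_scenes
  rw [PySem.List.mem_sorted, mem_scenesSet]
  simp [PySem.Set.empty]

theorem nodup_unique_scenes (sl : List (List (String × String))) :
    (get_unique_scenes sl).Nodup := by
  unfold get_unique_scenes
  exact (PySem.List.sorted_perm _ _ _).nodup_iff.mpr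
    (nodup_scenesSet sl PySem.Set.empty List.nodup_nil)

-- ===== VERDICT (by name: the statement is the Claim_ definition above) =====
theorem annotate_scenes_spec : Claim_equal_annotate_scenes := by
  intro sl _
  show annotate_scenes sl = annotate_scenes_alt sl
  unfold annotate_scenes
  have hbody : (fun (cur : List (List (String × String))) (sid : String) =>
      let scene_shots := cur.filter (fun s => sceneOf s == sid)
      let summary := annotate_scene sid scene_shots
      cur.map (fun s => if sceneOf s = sid then updShot s summary else s)) =
      fun cur sid => cur.map (gStep sid) := by
    funext cur sid
    simp [gStep, annotate_scene]
  rw [hbody, foldl_map_fusion]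
  apply List.map_congr_left
  intro x hx
  rw [fold_g_eq x _ (nodup_unique_scenes sl)]
  by_cases hne : sceneOf x ≠ ""
  · rw [if_pos ((mem_unique_scenes _ sl).mpr ⟨x, hx, rfl, hne⟩)]
    simp [hne, annotate_scene]
  · push_neg at hne
    rw [if_neg (by rw [mem_unique_scenes]; rintro ⟨s, _, h1, h2⟩; exact h2 hne)]
    simp [hne]
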